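-- pv_equiv track=rewrite | github.com/jaydrennan/sudoku_solver | sudoku_solver/validate_puzzle.py | quadrants_valid
-- ===== SOURCE A (Python) =====
-- def quadrants_valid(grid):
--     starting_points = [0, 3, 6, 27, 30, 33, 54, 57, 60]
--     for starting_point in starting_points:
--         quadrant = (
--             grid[starting_point : starting_point + 3]
--             + grid[starting_point + 9 : starting_point + 12]
--             + grid[starting_point + 18 : starting_point + 21]
--         )
--
--         for i in range(1, 10):
--             if quadrant.count(i) > 1:
--                 return False
--     return True
-- ===== SOURCE B (Python) =====
-- def quadrants_valid(grid):
--     for sp in (0, 3, 6, 27, 30, 33, 54, 57, 60):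
--         seen = set()
--         for row_start in (sp, sp + 9, sp + 18):
--             for v in grid[row_start:row_start + 3]:
--                 if 1 <= v <= 9:
--                     if v in seen:
--                         return False
--                     seen.add(v)
--     return True
-- ===== Notes on version B (the rewrite author's own statement) =====
-- stated objective: simpler
-- what changed: Replaces the per-quadrant nine count() scans over a concatenated slice list with a single duplicate-detection pass over the quadrant's three row slices using a seen set.
import Mathlib
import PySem

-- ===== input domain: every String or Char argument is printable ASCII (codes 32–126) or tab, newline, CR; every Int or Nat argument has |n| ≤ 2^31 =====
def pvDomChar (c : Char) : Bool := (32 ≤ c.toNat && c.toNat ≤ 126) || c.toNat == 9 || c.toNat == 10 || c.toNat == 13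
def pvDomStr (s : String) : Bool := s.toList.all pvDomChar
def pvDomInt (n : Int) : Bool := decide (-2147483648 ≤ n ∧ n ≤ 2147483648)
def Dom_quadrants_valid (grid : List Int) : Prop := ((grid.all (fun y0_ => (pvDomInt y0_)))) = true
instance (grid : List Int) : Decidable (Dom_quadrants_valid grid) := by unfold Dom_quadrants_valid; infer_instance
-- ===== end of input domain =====

-- B replaces the nine per-digit count() scans over each concatenated quadrant slice by a
-- single duplicate-detection pass over the quadrant's three row slices with a 'seen' set (simpler).

-- ===== PORT A =====
-- inner 'for i in range(1, 10): if quadrant.count(i) > 1: return False'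
def pvCheckA (q : List Int) : List Int → Bool
  | [] => true
  | i :: is => if PySem.List.count q i > 1 then false else pvCheckA q is

-- outer 'for starting_point in starting_points' with early return False
def pvGoA (grid : List Int) : List Int → Bool
  | [] => true
  | sp :: rest =>
    let quadrant := PySem.List.slice grid (some sp) (some (sp + 3)) ++
      PySem.List.slice grid (some (sp + 9)) (some (sp + 12)) ++
      PySem.List.slice grid (some (sp + 18)) (some (sp + 21))
    if pvCheckA quadrant (PySem.List.pyRange 1 10 1) then pvGoA grid rest else false

def quadrants_valid (grid : List Int) : Bool :=
  pvGoA grid [0, 3, 6, 27, 30, 33, 54, 57, 60]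

-- ===== PORT B =====
-- 'for v in grid[rs:rs+3]: if 1 <= v <= 9: if v in seen: return False; seen.add(v)'
-- none = the early 'return False'; some seen = the updated seen set
def pvScanB : PySem.Set Int → List Int → Option (PySem.Set Int)
  | seen, [] => some seen
  | seen, v :: vs =>
    if 1 ≤ v ∧ v ≤ 9 then
      if PySem.Set.contains seen v then none
      else pvScanB (PySem.Set.add seen v) vs
    else pvScanB seen vs

-- 'for row_start in (sp, sp + 9, sp + 18)': thread the seen set through the three rows
def pvRowsB (grid : List Int) : PySem.Set Int → List Int → Option (PySem.Set Int)
  | seen, [] => some seen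
  | seen, rs :: rest =>
    match pvScanB seen (PySem.List.slice grid (some rs) (some (rs + 3))) with
    | none => none
    | some s => pvRowsB grid s rest

def pvGoB (grid : List Int) : List Int → Bool
  | [] => true
  | sp :: rest =>
    match pvRowsB grid PySem.Set.empty [sp, sp + 9, sp + 18] with
    | none => false
    | some _ => pvGoB grid rest

def quadrants_valid_alt (grid : List Int) : Bool :=
  pvGoB grid [0, 3, 6, 27, 30, 33, 54, 57, 60]

-- ===== PRECONDITION & SPEC =====
def Spec_quadrants_valid (grid : List Int) (out : Bool) : Prop := out = quadrants_valid_alt grid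
instance (grid : List Int) (out : Bool) : Decidable (Spec_quadrants_valid grid out) := by unfold Spec_quadrants_valid; infer_instance

-- ===== CLAIM (what is proved, stated in full; the proofs are below) =====
def Claim_equal_quadrants_valid : Prop := ∀ (grid : List Int), Dom_quadrants_valid grid → Spec_quadrants_valid grid (quadrants_valid grid)

-- ===== LEMMAS AND PROOFS =====

theorem pvScanB_append (a b : List Int) (s : PySem.Set Int) :
    pvScanB s (a ++ b) = (pvScanB s a).bind (fun t => pvScanB t b) := by
  induction a generalizing s with
  | nil => simp [pvScanB]
  | cons v vs ih =>
    simp only [List.cons_append, pvScanB]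
    by_cases hv : 1 ≤ v ∧ v ≤ 9
    · by_cases hm : v ∈ s
      · simp [hv, hm]
      · simp [hv, hm, ih]
    · simp [hv, ih]

theorem pvScanB_char (q : List Int) (s : PySem.Set Int) :
    pvScanB s q ≠ none ↔
      ∀ v : Int, 1 ≤ v → v ≤ 9 → q.count v + (if v ∈ s then 1 else 0) ≤ 1 := by
  induction q generalizing s with
  | nil =>
    simp only [pvScanB, ne_eq, reduceCtorEq, not_false_iff, true_iff]
    intro v _ _; simp only [List.count_nil]; split <;> omega
  | cons v vs ih =>
    simp only [pvScanB]
    by_cases hv : 1 ≤ v ∧ v ≤ 9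
    · rw [if_pos hv]
      by_cases hm : v ∈ s
      · rw [if_pos ((PySem.Set.contains_iff s v).mpr hm)]
        constructor
        · intro h; exact absurd rfl h
        · intro h; exfalso
          have hw := h v hv.1 hv.2
          rw [List.count_cons_self, if_pos hm] at hw; omega
      · rw [if_neg (fun hc => hm ((PySem.Set.contains_iff s v).mp hc))]
        rw [ih]
        constructor
        · intro h w h1 h9
          have hw := h w h1 h9
          by_cases hwv : w = v
          · subst hwv
            rw [List.count_cons_self, if_neg hm]
            rw [if_pos (by simp [PySem.Set.mem_add])] at hw
            omega
          · rw [List.count_cons_of_ne (Ne.symm hwv)]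
            have hmw : (w ∈ PySem.Set.add s v) ↔ w ∈ s := by
              rw [PySem.Set.mem_add]; simp [hwv]
            rw [if_congr hmw rfl rfl] at hw
            exact hw
        · intro h w h1 h9
          have hw := h w h1 h9
          by_cases hwv : w = v
          · subst hwv
            rw [List.count_cons_self, if_neg hm] at hw
            rw [if_pos (by simp [PySem.Set.mem_add])]
            omega
          · rw [List.count_cons_of_ne (Ne.symm hwv)] at hw
            have hmw : (w ∈ PySem.Set.add s v) ↔ w ∈ s := by
              rw [PySem.Set.mem_add]; simp [hwv]
            rw [if_congr hmw rfl rfl]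
            exact hw
    · rw [if_neg hv]
      rw [ih]
      apply forall_congr'; intro w
      by_cases hwv : w = v
      · subst hwv
        constructor <;> (intro _ h1 h9; exact absurd ⟨h1, h9⟩ hv)
      · rw [List.count_cons_of_ne (Ne.symm hwv)]

theorem pvCheckA_char (digits q : List Int) :
    pvCheckA q digits = true ↔ ∀ i ∈ digits, q.count i ≤ 1 := by
  induction digits with
  | nil => simp [pvCheckA]
  | cons i is ih =>
    simp only [pvCheckA]
    by_cases hcgt : PySem.List.count q i > 1
    · rw [if_pos hcgt]
      constructor
      · intro h; simp at h
      · intro h; exfalso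
        have := h i (List.mem_cons_self ..)
        rw [PySem.List.count_eq] at hcgt; omega
    · rw [if_neg hcgt, ih]
      rw [PySem.List.count_eq, not_lt] at hcgt
      simp only [List.mem_cons]
      constructor
      · rintro h w (rfl | hw)
        · exact hcgt
        · exact h w hw
      · intro h w hw; exact h w (Or.inr hw)

theorem pvQuad_step (grid : List Int) (sp : Int) :
    (pvCheckA (PySem.List.slice grid (some sp) (some (sp + 3)) ++
        PySem.List.slice grid (some (sp + 9)) (some (sp + 12)) ++
        PySem.List.slice grid (some (sp + 18)) (some (sp + 21)))
      (PySem.List.pyRange 1 10 1) = true) ↔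
      pvRowsB grid PySem.Set.empty [sp, sp + 9, sp + 18] ≠ none := by
  have h912 : sp + 9 + 3 = sp + 12 := by ring
  have h1821 : sp + 18 + 3 = sp + 21 := by ring
  have hrows : pvRowsB grid PySem.Set.empty [sp, sp + 9, sp + 18] =
      pvScanB PySem.Set.empty
        (PySem.List.slice grid (some sp) (some (sp + 3)) ++
          PySem.List.slice grid (some (sp + 9)) (some (sp + 12)) ++
          PySem.List.slice grid (some (sp + 18)) (some (sp + 21))) := by
    simp only [pvRowsB, h912, h1821, pvScanB_append, Option.bind]
    cases pvScanB PySem.Set.empty (PySem.List.slice grid (some sp) (some (sp + 3))) with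
    | none => rfl
    | some t =>
      simp only [pvRowsB]
      cases pvScanB t (PySem.List.slice grid (some (sp + 9)) (some (sp + 12))) with
      | none => rfl
      | some u =>
        simp only [pvRowsB]
        cases pvScanB u (PySem.List.slice grid (some (sp + 18)) (some (sp + 21))) with
        | none => rfl
        | some w => rfl
  rw [hrows, pvScanB_char, pvCheckA_char]
  constructor
  · intro h v h1 h9
    have := h v (by rw [PySem.List.mem_pyRange_one]; omega)
    have hnm : ¬ (v ∈ (PySem.Set.empty : PySem.Set Int)) := List.not_mem_nil
    rw [if_neg hnm]
    omega
  · intro h i hi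
    rw [PySem.List.mem_pyRange_one] at hi
    have := h i hi.1 (by omega)
    have hnm : ¬ (i ∈ (PySem.Set.empty : PySem.Set Int)) := List.not_mem_nil
    rw [if_neg hnm] at this
    omega

theorem pvGo_eq (grid : List Int) (sps : List Int) :
    pvGoA grid sps = pvGoB grid sps := by
  induction sps with
  | nil => rfl
  | cons sp rest ih =>
    simp only [pvGoA, pvGoB]
    cases hr : pvRowsB grid PySem.Set.empty [sp, sp + 9, sp + 18] with
    | none =>
      have hfalse : pvCheckA (PySem.List.slice grid (some sp) (some (sp + 3)) ++
          PySem.List.slice grid (some (sp + 9)) (some (sp + 12)) ++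
          PySem.List.slice grid (some (sp + 18)) (some (sp + 21)))
        (PySem.List.pyRange 1 10 1) = false := by
        rw [Bool.eq_false_iff]
        intro h
        exact (pvQuad_step grid sp).mp h hr
      rw [hfalse]
      simp
    | some t =>
      have htrue : pvCheckA (PySem.List.slice grid (some sp) (some (sp + 3)) ++
          PySem.List.slice grid (some (sp + 9)) (some (sp + 12)) ++
          PySem.List.slice grid (some (sp + 18)) (some (sp + 21)))
        (PySem.List.pyRange 1 10 1) = true := by
        rw [pvQuad_step, hr]
        simp
      rw [htrue]
      simp [ih]

-- ===== VERDICT (by name: the statement is the Claim_ definition above) =====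
theorem quadrants_valid_spec : Claim_equal_quadrants_valid := by
  intro grid _
  unfold Spec_quadrants_valid quadrants_valid quadrants_valid_alt
  exact pvGo_eq grid _
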